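-- pv_equiv track=rewrite | github.com/collinsakenga/codewars_solutions | 6 kyu/How many cows do you have.py | count_cows
-- ===== SOURCE A (Python) =====
-- def count_cows(n):
--     if not isinstance(n, int):
--         return None
--     list=[1,1,1,2]
--     if n<=3:
--         return list[n]
--     for i in range(n-3):
--         list.append(list[-2]+list[-3]+list[-4])
--     return list[n]
-- ===== SOURCE B (Python) =====
-- def count_cows(n):
--     # O(log n) via 4x4 matrix exponentiation of the recurrence f(k)=f(k-2)+f(k-3)+f(k-4)
--     if not isinstance(n, int):
--         return None
--     base = [1, 1, 1, 2]
--     if n <= 3: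
--         return base[n]
--
--     def mat_mul(a, b):
--         return tuple(tuple(sum(a[i][k] * b[k][j] for k in range(4)) for j in range(4)) for i in range(4))
--
--     def mat_pow(m, e):
--         if e == 0:
--             return ((1, 0, 0, 0), (0, 1, 0, 0), (0, 0, 1, 0), (0, 0, 0, 1))
--         h = mat_pow(m, e // 2)
--         h2 = mat_mul(h, h)
--         return h2 if e % 2 == 0 else mat_mul(m, h2)
--
--     M = ((0, 1, 1, 1), (1, 0, 0, 0), (0, 1, 0, 0), (0, 0, 1, 0))
--     p = mat_pow(M, n - 3)
--     r = p[0]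
--     # first component of p @ (f3, f2, f1, f0) = (2, 1, 1, 1)
--     return 2 * r[0] + r[1] + r[2] + r[3]
-- ===== Notes on version B (the rewrite author's own statement) =====
-- stated objective: faster
-- what changed: Replaces A's O(n) append loop over the recurrence f(k)=f(k-2)+f(k-3)+f(k-4) with binary exponentiation of the recurrence's 4x4 companion matrix, reading the answer off the first row.
import Mathlib
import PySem

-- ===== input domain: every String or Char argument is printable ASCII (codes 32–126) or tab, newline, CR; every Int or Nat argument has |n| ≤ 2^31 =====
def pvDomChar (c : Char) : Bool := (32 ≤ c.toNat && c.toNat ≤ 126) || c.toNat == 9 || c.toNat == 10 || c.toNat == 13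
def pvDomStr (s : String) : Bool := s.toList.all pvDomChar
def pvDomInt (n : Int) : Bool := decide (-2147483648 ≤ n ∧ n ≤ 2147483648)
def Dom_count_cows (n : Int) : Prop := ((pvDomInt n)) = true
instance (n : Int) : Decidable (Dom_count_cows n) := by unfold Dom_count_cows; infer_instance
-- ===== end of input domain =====

-- B replaces A's O(n) loop by binary exponentiation of the recurrence's 4x4 companion matrix (objective: faster).

-- ===== PORT A =====
-- Port of A. `.getD 0` marks Python IndexError, excluded by Pre_count_cows;
-- inside the loop the list always has length ≥ 4, so those gets never raise.
def count_cows (n : Int) : Int :=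
  let l : List Int := [1, 1, 1, 2]
  if n ≤ 3 then (PySem.List.pyGet? l n).getD 0
  else
    let l' := (PySem.List.pyRange 0 (n - 3) 1).foldl
      (fun acc _ => acc ++ [(PySem.List.pyGet? acc (-2)).getD 0 +
                            (PySem.List.pyGet? acc (-3)).getD 0 +
                            (PySem.List.pyGet? acc (-4)).getD 0]) l
    (PySem.List.pyGet? l' n).getD 0

-- ===== PORT B =====
abbrev Vec4 : Type := Int × Int × Int × Int
abbrev Mat4 : Type := Vec4 × Vec4 × Vec4 × Vec4

-- Source B's mat_mul: entry (i,j) is sum over k of a[i][k]*b[k][j], written out for the 4 values of k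
def matMul (a b : Mat4) : Mat4 :=
  ((a.1.1*b.1.1 + a.1.2.1*b.2.1.1 + a.1.2.2.1*b.2.2.1.1 + a.1.2.2.2*b.2.2.2.1,
    a.1.1*b.1.2.1 + a.1.2.1*b.2.1.2.1 + a.1.2.2.1*b.2.2.1.2.1 + a.1.2.2.2*b.2.2.2.2.1,
    a.1.1*b.1.2.2.1 + a.1.2.1*b.2.1.2.2.1 + a.1.2.2.1*b.2.2.1.2.2.1 + a.1.2.2.2*b.2.2.2.2.2.1,
    a.1.1*b.1.2.2.2 + a.1.2.1*b.2.1.2.2.2 + a.1.2.2.1*b.2.2.1.2.2.2 + a.1.2.2.2*b.2.2.2.2.2.2),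
   (a.2.1.1*b.1.1 + a.2.1.2.1*b.2.1.1 + a.2.1.2.2.1*b.2.2.1.1 + a.2.1.2.2.2*b.2.2.2.1,
    a.2.1.1*b.1.2.1 + a.2.1.2.1*b.2.1.2.1 + a.2.1.2.2.1*b.2.2.1.2.1 + a.2.1.2.2.2*b.2.2.2.2.1,
    a.2.1.1*b.1.2.2.1 + a.2.1.2.1*b.2.1.2.2.1 + a.2.1.2.2.1*b.2.2.1.2.2.1 + a.2.1.2.2.2*b.2.2.2.2.2.1,
    a.2.1.1*b.1.2.2.2 + a.2.1.2.1*b.2.1.2.2.2 + a.2.1.2.2.1*b.2.2.1.2.2.2 + a.2.1.2.2.2*b.2.2.2.2.2.2),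
   (a.2.2.1.1*b.1.1 + a.2.2.1.2.1*b.2.1.1 + a.2.2.1.2.2.1*b.2.2.1.1 + a.2.2.1.2.2.2*b.2.2.2.1,
    a.2.2.1.1*b.1.2.1 + a.2.2.1.2.1*b.2.1.2.1 + a.2.2.1.2.2.1*b.2.2.1.2.1 + a.2.2.1.2.2.2*b.2.2.2.2.1,
    a.2.2.1.1*b.1.2.2.1 + a.2.2.1.2.1*b.2.1.2.2.1 + a.2.2.1.2.2.1*b.2.2.1.2.2.1 + a.2.2.1.2.2.2*b.2.2.2.2.2.1,
    a.2.2.1.1*b.1.2.2.2 + a.2.2.1.2.1*b.2.1.2.2.2 + a.2.2.1.2.2.1*b.2.2.1.2.2.2 + a.2.2.1.2.2.2*b.2.2.2.2.2.2),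
   (a.2.2.2.1*b.1.1 + a.2.2.2.2.1*b.2.1.1 + a.2.2.2.2.2.1*b.2.2.1.1 + a.2.2.2.2.2.2*b.2.2.2.1,
    a.2.2.2.1*b.1.2.1 + a.2.2.2.2.1*b.2.1.2.1 + a.2.2.2.2.2.1*b.2.2.1.2.1 + a.2.2.2.2.2.2*b.2.2.2.2.1,
    a.2.2.2.1*b.1.2.2.1 + a.2.2.2.2.1*b.2.1.2.2.1 + a.2.2.2.2.2.1*b.2.2.1.2.2.1 + a.2.2.2.2.2.2*b.2.2.2.2.2.1,
    a.2.2.2.1*b.1.2.2.2 + a.2.2.2.2.1*b.2.1.2.2.2 + a.2.2.2.2.2.1*b.2.2.1.2.2.2 + a.2.2.2.2.2.2*b.2.2.2.2.2.2))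

def matId : Mat4 := ((1,0,0,0),(0,1,0,0),(0,0,1,0),(0,0,0,1))

-- Source B's mat_pow: binary exponentiation (the Python exponent n-3 is positive, so e : Nat)
def matPow (m : Mat4) (e : Nat) : Mat4 :=
  if h : e = 0 then matId
  else
    let hm := matPow m (e / 2)
    let h2 := matMul hm hm
    if e % 2 == 0 then h2 else matMul m h2
decreasing_by exact Nat.div_lt_self (Nat.pos_of_ne_zero h) one_lt_two

def count_cows_alt (n : Int) : Int :=
  let base : List Int := [1, 1, 1, 2]
  if n ≤ 3 then (PySem.List.pyGet? base n).getD 0  -- `.getD 0` marks IndexError, excluded by Pre_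
  else
    let M : Mat4 := ((0,1,1,1),(1,0,0,0),(0,1,0,0),(0,0,1,0))
    let p := matPow M (n - 3).toNat
    let r := p.1
    2 * r.1 + r.2.1 + r.2.2.1 + r.2.2.2

-- ===== PRECONDITION & SPEC =====
-- Pre_ excludes exactly the inputs on which A (and B) raise IndexError on list[n]: indices below the negative length of the base list.
def Pre_count_cows (n : Int) : Prop := -4 ≤ n
instance (n : Int) : Decidable (Pre_count_cows n) := by unfold Pre_count_cows; infer_instance
def pvWitness_count_cows : Int := (7)

def Spec_count_cows (n : Int) (out : Int) : Prop := out = count_cows_alt n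
instance (n : Int) (out : Int) : Decidable (Spec_count_cows n out) := by unfold Spec_count_cows; infer_instance

-- ===== CLAIM (what is proved, stated in full; the proofs are below) =====
def Claim_equal_count_cows : Prop := ∀ (n : Int), Dom_count_cows n → Pre_count_cows n → Spec_count_cows n (count_cows n)

-- ===== LEMMAS AND PROOFS =====

-- the recurrence as a reference function
def f : Nat → Int
  | 0 => 1
  | 1 => 1
  | 2 => 1
  | 3 => 2
  | (k+4) => f (k+2) + f (k+1) + f k

-- ---- A side: the loop builds [f 0, …, f (k+3)] ----
theorem loopA (k : Nat) :
    (PySem.List.pyRange 0 (k : Int) 1).foldl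
      (fun acc _ => acc ++ [(PySem.List.pyGet? acc (-2)).getD 0 +
                            (PySem.List.pyGet? acc (-3)).getD 0 +
                            (PySem.List.pyGet? acc (-4)).getD 0]) [1, 1, 1, 2]
      = (List.range (k + 4)).map f := by
  induction k with
  | zero => decide
  | succ k ih =>
      have hsplit : PySem.List.pyRange 0 ((k : Int) + 1) 1
          = PySem.List.pyRange 0 (k : Int) 1 ++ [(k : Int)] :=
        PySem.List.pyRange_one_succ_right (by positivity)
      have hlen : ((List.range (k + 4)).map f).length = k + 4 := by simp
      push_cast
      rw [hsplit, List.foldl_append, ih]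
      simp only [List.foldl_cons, List.foldl_nil]
      rw [PySem.List.pyGet?_neg_ofNat _ 2 (by omega) (by omega),
          PySem.List.pyGet?_neg_ofNat _ 3 (by omega) (by omega),
          PySem.List.pyGet?_neg_ofNat _ 4 (by omega) (by omega)]
      rw [hlen]
      have h2 : k + 4 - 2 = k + 2 := by omega
      have h3 : k + 4 - 3 = k + 1 := by omega
      have h4 : k + 4 - 4 = k := by omega
      rw [h2, h3, h4]
      simp only [List.getElem?_map, List.getElem?_range (by omega : k + 2 < k + 4),
        List.getElem?_range (by omega : k + 1 < k + 4), List.getElem?_range (by omega : k < k + 4),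
        Option.map_some, Option.getD_some]
      have hr : List.range (k + 1 + 4) = List.range (k + 3) ++ [k + 3] ++ [k + 4] := by
        rw [show k + 1 + 4 = (k + 3) + 1 + 1 by omega, List.range_succ,
            show k + 3 + 1 = (k + 4) by omega, List.range_succ,
            show k + 4 = (k + 3) + 1 by omega, List.range_succ]
      simp [hr, show f (k + 4) = f (k + 2) + f (k + 1) + f k from rfl]
      rw [show k + 4 = (k + 3) + 1 by omega, List.range_succ]
      simp

-- ---- B side ----
def powL (m : Mat4) : Nat → Mat4
  | 0 => matId
  | (e+1) => matMul m (powL m e)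

theorem matMul_id_left (m : Mat4) : matMul matId m = m := by
  obtain ⟨⟨a,b,c,d⟩,⟨e,g,h,i⟩,⟨j,k,l,o⟩,⟨p,q,r,s⟩⟩ := m
  simp only [matMul, matId, Prod.mk.injEq]
  and_intros <;> ring

theorem matMul_id_right (m : Mat4) : matMul m matId = m := by
  obtain ⟨⟨a,b,c,d⟩,⟨e,g,h,i⟩,⟨j,k,l,o⟩,⟨p,q,r,s⟩⟩ := m
  simp only [matMul, matId, Prod.mk.injEq]
  and_intros <;> ring

theorem matMul_assoc (a b c : Mat4) : matMul (matMul a b) c = matMul a (matMul b c) := by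
  obtain ⟨⟨a1,a2,a3,a4⟩,⟨a5,a6,a7,a8⟩,⟨a9,a10,a11,a12⟩,⟨a13,a14,a15,a16⟩⟩ := a
  obtain ⟨⟨b1,b2,b3,b4⟩,⟨b5,b6,b7,b8⟩,⟨b9,b10,b11,b12⟩,⟨b13,b14,b15,b16⟩⟩ := b
  obtain ⟨⟨c1,c2,c3,c4⟩,⟨c5,c6,c7,c8⟩,⟨c9,c10,c11,c12⟩,⟨c13,c14,c15,c16⟩⟩ := c
  simp only [matMul, Prod.mk.injEq]
  and_intros <;> ring

theorem powL_add (m : Mat4) (a b : Nat) : powL m (a + b) = matMul (powL m a) (powL m b) := by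
  induction a with
  | zero => simp [powL, matMul_id_left]
  | succ a ih =>
      have : a + 1 + b = (a + b) + 1 := by omega
      rw [this, powL, ih, powL, matMul_assoc]

theorem matPow_eq_powL (m : Mat4) (e : Nat) : matPow m e = powL m e := by
  induction e using Nat.strong_induction_on with
  | _ e ih =>
      by_cases h : e = 0
      · subst h; simp [matPow, powL]
      · rw [matPow]
        have ihh := ih (e / 2) (Nat.div_lt_self (Nat.pos_of_ne_zero h) one_lt_two)
        rw [dif_neg h]
        simp only [ihh]
        by_cases hp : e % 2 = 0
        · rw [if_pos (by simp [hp]), ← powL_add, show e / 2 + e / 2 = e by omega]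
        · rw [if_neg (by simp [hp]), ← powL_add,
              show matMul m (powL m (e / 2 + e / 2)) = matMul (powL m 1) (powL m (e / 2 + e / 2))
                by simp [powL, matMul_id_right],
              ← powL_add, show 1 + (e / 2 + e / 2) = e by omega]

def matVec (m : Mat4) (v : Vec4) : Vec4 :=
  (m.1.1*v.1 + m.1.2.1*v.2.1 + m.1.2.2.1*v.2.2.1 + m.1.2.2.2*v.2.2.2,
   m.2.1.1*v.1 + m.2.1.2.1*v.2.1 + m.2.1.2.2.1*v.2.2.1 + m.2.1.2.2.2*v.2.2.2,
   m.2.2.1.1*v.1 + m.2.2.1.2.1*v.2.1 + m.2.2.1.2.2.1*v.2.2.1 + m.2.2.1.2.2.2*v.2.2.2,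
   m.2.2.2.1*v.1 + m.2.2.2.2.1*v.2.1 + m.2.2.2.2.2.1*v.2.2.1 + m.2.2.2.2.2.2*v.2.2.2)

theorem matVec_mul (a b : Mat4) (v : Vec4) : matVec (matMul a b) v = matVec a (matVec b v) := by
  obtain ⟨⟨a1,a2,a3,a4⟩,⟨a5,a6,a7,a8⟩,⟨a9,a10,a11,a12⟩,⟨a13,a14,a15,a16⟩⟩ := a
  obtain ⟨⟨b1,b2,b3,b4⟩,⟨b5,b6,b7,b8⟩,⟨b9,b10,b11,b12⟩,⟨b13,b14,b15,b16⟩⟩ := b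
  obtain ⟨v1,v2,v3,v4⟩ := v
  simp only [matMul, matVec, Prod.mk.injEq]
  and_intros <;> ring

def MC : Mat4 := ((0,1,1,1),(1,0,0,0),(0,1,0,0),(0,0,1,0))

theorem key (e : Nat) : matVec (powL MC e) (2, 1, 1, 1) = (f (e+3), f (e+2), f (e+1), f e) := by
  induction e with
  | zero => decide
  | succ e ih =>
      rw [powL, matVec_mul, ih]
      show _ = (f (e+4), f (e+3), f (e+2), f (e+1))
      rw [show f (e+4) = f (e+2) + f (e+1) + f e from rfl]
      simp only [MC, matVec, Prod.mk.injEq]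
      and_intros <;> ring

-- ===== VERDICT (by name: the statement is the Claim_ definition above) =====
theorem count_cows_spec : Claim_equal_count_cows := by
  intro n _ hpre
  unfold Spec_count_cows count_cows count_cows_alt
  by_cases h : n ≤ 3
  · simp only [h, if_pos]
  · simp only [h, if_false]
    have h4 : 4 ≤ n := by omega
    set k : Nat := (n - 3).toNat with hk
    have hn3 : n - 3 = (k : Int) := by omega
    rw [hn3, loopA k]
    have hnk : n = ((k + 3 : Nat) : Int) := by omega
    rw [hnk, PySem.List.pyGet?_natCast]
    rw [List.getElem?_map, List.getElem?_range (by omega : k + 3 < k + 4)]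
    simp only [Option.map_some, Option.getD_some]
    have := congrArg Prod.fst (key k)
    rw [matPow_eq_powL]
    show f (k + 3) = 2 * (powL MC k).1.1 + (powL MC k).1.2.1 + (powL MC k).1.2.2.1 + (powL MC k).1.2.2.2
    simp only [matVec] at this
    rw [← this]; ring
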